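-- pv_equiv track=rewrite | github.com/tdnguyen2020/noncanonical_mechanism | using_now.py | make_motif
-- ===== SOURCE A (Python) =====
-- def make_motif(pos1, pos2, pos3, pos4, pos5, pos6):
--     motif = ''
--     for pos in [pos1, pos2, pos3, pos4, pos5, pos6]:
--         if pos == 'G-T':
--             motif = motif +'W'
--         elif pos == 'T-G':
--             motif = motif +'w'
--         elif pos in ['A-T', 'T-A', 'G-C', 'C-G']:
--             motif = motif +pos[0]
--         elif pos in ['A-C', 'C-A']:
--             motif = motif +pos[0].lower()
--         else:
--             motif = motif + 'N'
--     return(motif)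
-- ===== SOURCE B (Python) =====
-- _COMPLEMENT = {'A': 'T', 'C': 'G', 'G': 'C', 'T': 'A'}
--
-- def _motif_char(pos):
--     # Parse the position as '<base>-<base>' and classify the base pair.
--     if len(pos) != 3 or pos[1] != '-':
--         return 'N'
--     x, y = pos[0], pos[2]
--     if _COMPLEMENT.get(x) == y:      # Watson-Crick pair: keep the first base
--         return x
--     if {x, y} == {'G', 'T'}:         # wobble pair: W for G-T, w for T-G
--         return 'W' if x == 'G' else 'w'
--     if {x, y} == {'A', 'C'}:         # A/C mismatch: lowercase first base
--         return x.lower()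
--     return 'N'
--
-- def make_motif(pos1, pos2, pos3, pos4, pos5, pos6):
--     return ''.join(map(_motif_char, (pos1, pos2, pos3, pos4, pos5, pos6)))
-- ===== Notes on version B (the rewrite author's own statement) =====
-- stated objective: alternative
-- what changed: Instead of A's if/elif ladder over the eight whole position strings, B parses each position into its two flanking bases ('<base>-<base>') and classifies the base pair by pairing relations: a Watson-Crick complement lookup gives the first base, a {G,T} wobble set gives 'W'/'w', an {A,C} mismatch set gives the lowercased first base, anything else 'N'.
import Mathlib
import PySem

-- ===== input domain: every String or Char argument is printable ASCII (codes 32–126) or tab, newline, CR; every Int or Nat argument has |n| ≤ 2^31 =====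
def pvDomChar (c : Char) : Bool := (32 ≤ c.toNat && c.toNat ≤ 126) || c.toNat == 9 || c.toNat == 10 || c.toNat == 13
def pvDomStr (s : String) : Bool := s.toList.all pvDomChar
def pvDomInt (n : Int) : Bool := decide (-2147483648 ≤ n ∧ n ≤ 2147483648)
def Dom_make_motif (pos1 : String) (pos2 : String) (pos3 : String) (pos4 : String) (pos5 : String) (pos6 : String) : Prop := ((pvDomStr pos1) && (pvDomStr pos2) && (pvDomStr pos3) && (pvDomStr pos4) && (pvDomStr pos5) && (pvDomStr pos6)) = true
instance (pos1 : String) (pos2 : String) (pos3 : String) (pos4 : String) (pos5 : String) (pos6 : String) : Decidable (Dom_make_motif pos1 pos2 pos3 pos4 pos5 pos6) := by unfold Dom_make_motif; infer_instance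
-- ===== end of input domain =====

-- B parses each position as '<base>-<base>' and classifies the base PAIR by base-pairing
-- relations (complement / G-T wobble / A-C mismatch) instead of A's if/elif ladder over
-- the eight whole position strings (objective: alternative).

-- ===== PORT A =====
-- loop body of A's for-loop, step for step; pos[0] is ported with PySem.Str.pyGet?
-- (in the branches that use it the guard guarantees pos is a 3-char literal, so the
-- none case of pyGet? is unreachable there)
def pvAStep (motif : String) (pos : String) : String :=
  if pos == "G-T" then motif ++ "W"
  else if pos == "T-G" then motif ++ "w"
  else if ["A-T", "T-A", "G-C", "C-G"].contains pos then
    match PySem.Str.pyGet? pos 0 with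
    | some c => motif ++ String.ofList [c]
    | none => motif      -- unreachable (IndexError): guard forces pos nonempty
  else if ["A-C", "C-A"].contains pos then
    match PySem.Str.pyGet? pos 0 with
    | some c => motif ++ String.ofList [PySem.Chars.lowerChar c]
    | none => motif      -- unreachable
  else motif ++ "N"

def make_motif (pos1 : String) (pos2 : String) (pos3 : String) (pos4 : String) (pos5 : String) (pos6 : String) : String :=
  [pos1, pos2, pos3, pos4, pos5, pos6].foldl pvAStep ""

-- ===== PORT B =====
-- the _COMPLEMENT dict of Source B
def pvComplement : PySem.Dict Char Char :=
  PySem.Dict.ofList [('A', 'T'), ('C', 'G'), ('G', 'C'), ('T', 'A')]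

-- _motif_char of Source B, step for step; pos[0]/pos[1]/pos[2] via PySem.Str.pyGet?
-- (the length guard makes the indices in-range, so the none case is unreachable);
-- Python's set comparison {x, y} == {...} is PySem.Set.equal on PySem.Set.ofList
def pvMotifChar (pos : String) : String :=
  if PySem.Str.len pos ≠ 3 ∨ PySem.Str.pyGet? pos 1 ≠ some '-' then "N"
  else
    match PySem.Str.pyGet? pos 0, PySem.Str.pyGet? pos 2 with
    | some x, some y =>
        if pvComplement.get? x = some y then String.ofList [x]
        else if PySem.Set.equal (PySem.Set.ofList [x, y]) (PySem.Set.ofList ['G', 'T']) then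
          (if x = 'G' then "W" else "w")
        else if PySem.Set.equal (PySem.Set.ofList [x, y]) (PySem.Set.ofList ['A', 'C']) then
          String.ofList [PySem.Chars.lowerChar x]
        else "N"
    | _, _ => "N"      -- unreachable: the guard ensured length 3

def make_motif_alt (pos1 : String) (pos2 : String) (pos3 : String) (pos4 : String) (pos5 : String) (pos6 : String) : String :=
  PySem.Str.join "" ([pos1, pos2, pos3, pos4, pos5, pos6].map pvMotifChar)

-- ===== PRECONDITION & SPEC =====
def Spec_make_motif (pos1 : String) (pos2 : String) (pos3 : String) (pos4 : String) (pos5 : String) (pos6 : String) (out : String) : Prop := out = make_motif_alt pos1 pos2 pos3 pos4 pos5 pos6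
instance (pos1 : String) (pos2 : String) (pos3 : String) (pos4 : String) (pos5 : String) (pos6 : String) (out : String) : Decidable (Spec_make_motif pos1 pos2 pos3 pos4 pos5 pos6 out) := by unfold Spec_make_motif; infer_instance

-- ===== CLAIM (what is proved, stated in full; the proofs are below) =====
def Claim_equal_make_motif : Prop := ∀ (pos1 : String) (pos2 : String) (pos3 : String) (pos4 : String) (pos5 : String) (pos6 : String), Dom_make_motif pos1 pos2 pos3 pos4 pos5 pos6 → Spec_make_motif pos1 pos2 pos3 pos4 pos5 pos6 (make_motif pos1 pos2 pos3 pos4 pos5 pos6)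

-- ===== LEMMAS AND PROOFS =====

-- the complement dict lookup, as an if-chain over the key
theorem pvComplement_get (a : Char) :
    pvComplement.get? a =
      if a = 'A' then some 'T' else if a = 'C' then some 'G'
      else if a = 'G' then some 'C' else if a = 'T' then some 'A' else none := by
  have h : pvComplement = PySem.Dict.mk [('A', 'T'), ('C', 'G'), ('G', 'C'), ('T', 'A')] := by
    decide
  rw [h]
  simp only [PySem.Dict.get?_mk_cons, beq_iff_eq]
  by_cases h1 : a = 'A'; · simp [h1]
  rw [if_neg (fun e => h1 e.symm), if_neg h1]
  by_cases h2 : a = 'C'; · simp [h2]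
  rw [if_neg (fun e => h2 e.symm), if_neg h2]
  by_cases h3 : a = 'G'; · simp [h3]
  rw [if_neg (fun e => h3 e.symm), if_neg h3]
  by_cases h4 : a = 'T'; · simp [h4]
  rw [if_neg (fun e => h4 e.symm), if_neg h4]
  rfl

-- set(x, y) built by Python's set literal, as a plain list
theorem pvOfPair (a b : Char) : PySem.Set.ofList [a, b] = if a = b then [a] else [a, b] := by
  by_cases h : a = b <;>
    simp only [PySem.Set.ofList, PySem.Set.add, PySem.Set.empty, PySem.Set.contains,
      List.foldl, List.contains_nil, Bool.false_eq_true, if_false] <;>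
    simp [h] <;> exact fun e => h e.symm

-- Python's {x, y} == {u, v} for distinct literals u ≠ v
theorem pvPairEq (x y u v : Char) (huv : u ≠ v) :
    PySem.Set.equal (PySem.Set.ofList [x, y]) (PySem.Set.ofList [u, v]) = true ↔
      (x = u ∧ y = v) ∨ (x = v ∧ y = u) := by
  rw [pvOfPair, pvOfPair, if_neg huv]
  by_cases hxy : x = y
  · subst hxy
    rw [if_pos rfl]
    simp only [PySem.Set.equal, PySem.Set.issubset, PySem.Set.contains, List.all_cons,
      List.all_nil, List.contains_cons, List.contains_nil, Bool.or_false, Bool.and_true,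
      beq_iff_eq, Bool.and_eq_true, Bool.or_eq_true]
    constructor
    · rintro ⟨h1 | h1, h2, h3⟩ <;> exact absurd (h2.trans h3.symm) huv
    · rintro (⟨h1, h2⟩ | ⟨h1, h2⟩)
      · exact absurd (h1.symm.trans h2) huv
      · exact absurd (h2.symm.trans h1) huv
  · rw [if_neg hxy]
    simp only [PySem.Set.equal, PySem.Set.issubset, PySem.Set.contains, List.all_cons,
      List.all_nil, List.contains_cons, List.contains_nil, Bool.or_false, Bool.and_true,
      beq_iff_eq, Bool.and_eq_true, Bool.or_eq_true]
    constructor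
    · rintro ⟨⟨h1 | h1, h2 | h2⟩, _⟩ <;> simp_all
    · rintro (⟨h1, h2⟩ | ⟨h1, h2⟩) <;> subst h1 <;> subst h2 <;> simp_all [Ne.symm huv]

-- a position that is none of the eight recognized strings classifies as 'N'
theorem pvMotifChar_default (p : String)
    (h1 : p ≠ "G-T") (h2 : p ≠ "T-G") (h3 : p ≠ "A-T") (h4 : p ≠ "T-A")
    (h5 : p ≠ "G-C") (h6 : p ≠ "C-G") (h7 : p ≠ "A-C") (h8 : p ≠ "C-A") :
    pvMotifChar p = "N" := by
  unfold pvMotifChar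
  by_cases hg : PySem.Str.len p ≠ 3 ∨ PySem.Str.pyGet? p 1 ≠ some '-'
  · rw [if_pos hg]
  rw [if_neg hg]
  push Not at hg
  obtain ⟨hl, hm⟩ := hg
  rw [PySem.Str.len_eq] at hl
  have hl3 : p.toList.length = 3 := by exact_mod_cast hl
  obtain ⟨a, b, c, hlist⟩ := List.length_eq_three.mp hl3
  have h0 : PySem.Str.pyGet? p 0 = some a := by
    rw [show (0 : Int) = ((0 : ℕ) : Int) from rfl, PySem.Str.pyGet?_natCast, hlist]; rfl
  have h1' : PySem.Str.pyGet? p 1 = some b := by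
    rw [show (1 : Int) = ((1 : ℕ) : Int) from rfl, PySem.Str.pyGet?_natCast, hlist]; rfl
  have h2' : PySem.Str.pyGet? p 2 = some c := by
    rw [show (2 : Int) = ((2 : ℕ) : Int) from rfl, PySem.Str.pyGet?_natCast, hlist]; rfl
  have hb : b = '-' := by rw [h1'] at hm; exact Option.some.inj hm
  subst hb
  rw [h0, h2']
  dsimp only
  have hp : ∀ (u w : Char), a = u → c = w → p = String.ofList [u, '-', w] := by
    intro u w hu hw
    apply String.toList_inj.mp
    rw [hlist, hu, hw]
    simp
  by_cases hcc : pvComplement.get? a = some c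
  · exfalso
    rw [pvComplement_get] at hcc
    split_ifs at hcc with ha1 ha2 ha3 ha4
    · exact h3 (hp 'A' 'T' ha1 (Option.some.inj hcc).symm)
    · exact h6 (hp 'C' 'G' ha2 (Option.some.inj hcc).symm)
    · exact h5 (hp 'G' 'C' ha3 (Option.some.inj hcc).symm)
    · exact h4 (hp 'T' 'A' ha4 (Option.some.inj hcc).symm)
  rw [if_neg hcc]
  by_cases hw1 : PySem.Set.equal (PySem.Set.ofList [a, c]) (PySem.Set.ofList ['G', 'T']) = true
  · exfalso
    rcases (pvPairEq a c 'G' 'T' (by decide)).mp hw1 with ⟨hu, hv⟩ | ⟨hu, hv⟩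
    · exact h1 (hp 'G' 'T' hu hv)
    · exact h2 (hp 'T' 'G' hu hv)
  rw [if_neg hw1]
  by_cases hw2 : PySem.Set.equal (PySem.Set.ofList [a, c]) (PySem.Set.ofList ['A', 'C']) = true
  · exfalso
    rcases (pvPairEq a c 'A' 'C' (by decide)).mp hw2 with ⟨hu, hv⟩ | ⟨hu, hv⟩
    · exact h7 (hp 'A' 'C' hu hv)
    · exact h8 (hp 'C' 'A' hu hv)
  rw [if_neg hw2]

-- one loop step of A appends exactly B's classification of that position
theorem pvAStep_eq (m p : String) : pvAStep m p = m ++ pvMotifChar p := by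
  by_cases h1 : p = "G-T"
  · subst h1; rw [show pvMotifChar "G-T" = "W" from by decide]; rfl
  by_cases h2 : p = "T-G"
  · subst h2; rw [show pvMotifChar "T-G" = "w" from by decide]; rfl
  by_cases h3 : p = "A-T"
  · subst h3; rw [show pvMotifChar "A-T" = "A" from by decide]; rfl
  by_cases h4 : p = "T-A"
  · subst h4; rw [show pvMotifChar "T-A" = "T" from by decide]; rfl
  by_cases h5 : p = "G-C"
  · subst h5; rw [show pvMotifChar "G-C" = "G" from by decide]; rfl
  by_cases h6 : p = "C-G"
  · subst h6; rw [show pvMotifChar "C-G" = "C" from by decide]; rfl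
  by_cases h7 : p = "A-C"
  · subst h7; rw [show pvMotifChar "A-C" = "a" from by decide]; rfl
  by_cases h8 : p = "C-A"
  · subst h8; rw [show pvMotifChar "C-A" = "c" from by decide]; rfl
  rw [pvMotifChar_default p h1 h2 h3 h4 h5 h6 h7 h8]
  simp [pvAStep, h1, h2, h3, h4, h5, h6, h7, h8]

theorem pvJoin_empty_six (a b c d e f : String) :
    PySem.Str.join "" [a, b, c, d, e, f] = a ++ b ++ c ++ d ++ e ++ f := by
  apply String.toList_inj.mp
  simp [PySem.Str.join, PySem.Chars.join, List.intercalate]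

-- ===== VERDICT (by name: the statement is the Claim_ definition above) =====
theorem make_motif_spec : Claim_equal_make_motif := by
  intro p1 p2 p3 p4 p5 p6 _
  unfold Spec_make_motif make_motif make_motif_alt
  simp only [List.foldl, List.map, pvAStep_eq, pvJoin_empty_six]
  simp
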